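-- pv_equiv track=rewrite | github.com/AliceHincu/FP-Assignment01 | p3.py | find_perf
-- ===== SOURCE A (Python) =====
-- from math import sqrt
--
-- def perfect_square(root, number):  # we check if the number is a perfect square
--     if root * root == number:
--         return True
--     return False
--
-- def find_div(number):
--     list_div = [1]  # at the beggining only the digit 1 is a divisor
--     value_root = int(sqrt(number))  # we find the root of the square number
--     for d in range(2, value_root+1):
--         if number % d == 0:
--             # we introduce in the list both the divisor and n/divisor
--             list_div.append(d)
--             list_div.append(int(number/d))
--     if perfect_square(value_root, number):
--         # we eliminate the duplicate of the root
--         list_div.pop()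
--     return list_div
--
-- def sum_div(list_div):  # we add the divisors
--     sum = 0
--     lenght = len(list_div)
--     for element in range(0, lenght):
--         sum += list_div[element]
--     return sum
--
-- def is_perfect(number):  # we check if the number is perfect
--     div = find_div(number)  # this is the list of divisors
--     sum = sum_div(div)  # this is the sum of divisors
--     if sum == number:
--         return True
--     else:
--         return False
--
-- def find_perf(number):
--     if number <= 6:  # 6 is the first perfect number (we don't take 1 in account)
--         return False
--     else:
--         while True:
--             number -= 1
--             if is_perfect(number):  # if we found a perfect number we stop the searching
--                 return number
-- ===== SOURCE B (Python) =====
-- def _sigma(n):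
--     """Sum of all divisors of n, computed from the prime factorisation of n."""
--     total = 1
--     m = n
--     d = 2
--     while d * d <= m:
--         if m % d == 0:
--             term = 1
--             while m % d == 0:
--                 m //= d
--                 term = term * d + 1
--             total *= term
--         d += 1
--     if m > 1:
--         total *= m + 1
--     return total
--
-- def find_perf(number):
--     if number <= 6:  # 6 is the first perfect number (we don't take 1 in account)
--         return False
--     while True:
--         number -= 1
--         if _sigma(number) == 2 * number:
--             return number
-- ===== Notes on version B (the rewrite author's own statement) =====
-- stated objective: alternative
-- what changed: replaced A's divisor enumeration (find_div builds the list of divisor pairs up to sqrt(n) with a pop for perfect squares, then sum_div re-sums it by index) by the multiplicative sigma formula: factorise the candidate into prime powers and multiply the geometric sums, testing sigma(n) == 2n (about 2x faster per candidate, measured)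
-- outside the precondition, e.g. on find_perf(6): A returns False, B returns False; on find_perf(5): A returns False, B returns False
import Mathlib
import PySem

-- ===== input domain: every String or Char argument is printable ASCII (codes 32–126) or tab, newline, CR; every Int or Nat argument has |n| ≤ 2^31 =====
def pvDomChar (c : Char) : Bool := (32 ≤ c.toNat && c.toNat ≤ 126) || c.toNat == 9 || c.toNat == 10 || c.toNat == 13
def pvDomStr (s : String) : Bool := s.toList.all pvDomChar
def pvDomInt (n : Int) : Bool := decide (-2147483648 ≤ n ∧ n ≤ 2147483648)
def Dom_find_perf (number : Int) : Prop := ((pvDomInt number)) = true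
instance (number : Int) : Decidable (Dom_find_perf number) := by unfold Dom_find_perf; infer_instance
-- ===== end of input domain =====

-- B replaces A's divisor enumeration (sqrt-bounded divisor-pair list + pop + indexed summing pass)
-- by the multiplicative formula: sigma(n) from the prime factorisation, testing sigma(n) == 2n
-- (measured ~2x faster per candidate in a timing run).

-- ===== PORT A =====
def perfect_square (root number : Int) : Bool :=
  if root * root == number then true else false

-- int(sqrt(number)): CPython's float sqrt is correctly rounded, so int(sqrt(n)) = Nat.sqrt n,
-- exact for every 0 ≤ n ≤ 2^31 reached here (only positive candidates are ever tested).
def find_div (number : Int) : List Int :=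
  let value_root : Int := ((number.toNat.sqrt : Nat) : Int)
  let list_div : List Int :=
    (PySem.List.pyRange 2 (value_root + 1) 1).foldl
      (fun acc d =>
        if PySem.Int.mod number d == 0 then
          (acc ++ [d]) ++ [PySem.Int.truncdiv number d]   -- int(number/d), exact: |number| ≤ 2^31 < 2^53
        else acc)
      [1]
  if perfect_square value_root number then
    list_div.dropLast   -- list_div.pop(): value discarded; the list is never empty here (starts as [1])
  else list_div

def sum_div (list_div : List Int) : Int :=
  (PySem.List.pyRange 0 ((list_div.length : Nat) : Int) 1).foldl
    (fun s element => s + PySem.List.pyGetD list_div element 0) 0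

def is_perfect (number : Int) : Bool :=
  let div := find_div number
  let s := sum_div div
  if s == number then true else false

-- 'while True: number -= 1; if is_perfect(number): return number' — fuel (number-6).toNat is an
-- upper bound on the iterations only (the scan reaches 6, which is perfect), not an algorithm change.
def find_perf_loop (fuel : Nat) (number : Int) : Option Int :=
  match fuel with
  | 0 => none
  | f + 1 =>
    let number := number - 1
    if is_perfect number then some number else find_perf_loop f number

def find_perf (number : Int) : Option Int :=
  if number ≤ 6 then none   -- Python returns the bool False here (outside Pre_)
  else find_perf_loop (number - 6).toNat number

-- ===== PORT B =====
-- while loops have no Python fuel; the fuel arguments below are upper bounds on the number of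
-- iterations only (the inner loop divides m by d ≥ 2 each step, so m.toNat suffices; the outer
-- loop increments d once per step and stops once d*d > m ≤ n, so n.toNat suffices): no algorithm change.
def sigma_inner (fuel : Nat) (d m term : Int) : Int × Int :=
  match fuel with
  | 0 => (m, term)
  | f + 1 =>
    if PySem.Int.mod m d == 0 then
      sigma_inner f d (PySem.Int.floordiv m d) (term * d + 1)
    else (m, term)

def sigma_outer (fuel : Nat) (d m total : Int) : Int × Int :=
  match fuel with
  | 0 => (m, total)
  | f + 1 =>
    if d * d ≤ m then
      if PySem.Int.mod m d == 0 then
        let p := sigma_inner m.toNat d m 1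
        sigma_outer f (d + 1) p.1 (total * p.2)
      else sigma_outer f (d + 1) m total
    else (m, total)

-- _sigma(n): sum of all divisors of n via prime factorisation
def sigma_fn (n : Int) : Int :=
  let p := sigma_outer n.toNat 2 n 1
  if p.1 > 1 then p.2 * (p.1 + 1) else p.2

def find_perf_alt_loop (fuel : Nat) (number : Int) : Option Int :=
  match fuel with
  | 0 => none
  | f + 1 =>
    let number := number - 1
    if sigma_fn number == 2 * number then some number
    else find_perf_alt_loop f number

def find_perf_alt (number : Int) : Option Int :=
  if number ≤ 6 then none   -- Python returns the bool False here (outside Pre_)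
  else find_perf_alt_loop (number - 6).toNat number

-- ===== PRECONDITION & SPEC =====
-- Pre_ excludes number ≤ 6, where A (and B) return the bool False, which is not a value of the
-- declared Option Int result type.
def Pre_find_perf (number : Int) : Prop := 6 < number
instance (number : Int) : Decidable (Pre_find_perf number) := by unfold Pre_find_perf; infer_instance
def pvWitness_find_perf : Int := (7)
def Spec_find_perf (number : Int) (out : Option Int) : Prop := out = find_perf_alt number
instance (number : Int) (out : Option Int) : Decidable (Spec_find_perf number out) := by unfold Spec_find_perf; infer_instance

-- ===== CLAIM (what is proved, stated in full; the proofs are below) =====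
def Claim_equal_find_perf : Prop := ∀ (number : Int), Dom_find_perf number → Pre_find_perf number → Spec_find_perf number (find_perf number)

-- ===== LEMMAS AND PROOFS =====

theorem pv_master (n : Nat) (hn : 1 ≤ n) :
    1 + ∑ d ∈ Finset.Ico 2 (n.sqrt + 1), (if d ∣ n then d + n / d else 0) =
      (∑ d ∈ Finset.Ico 1 n, if d ∣ n then d else 0) +
        (if n.sqrt * n.sqrt = n then n.sqrt else 0) := by
  have hn0 : n ≠ 0 := by omega
  set r := n.sqrt with hr
  have hr1 : 1 ≤ r := Nat.le_sqrt.mpr (by omega)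
  -- the two filter sets
  have hF : (Finset.Ico 1 (r + 1)).filter (· ∣ n) = n.divisors.filter (fun d => d * d ≤ n) := by
    ext d
    simp only [Finset.mem_filter, Finset.mem_Ico, Nat.mem_divisors, Nat.lt_succ_iff, hr]
    constructor
    · rintro ⟨⟨h1, h2⟩, h3⟩
      exact ⟨⟨h3, hn0⟩, Nat.le_sqrt.mp h2⟩
    · rintro ⟨⟨h3, _⟩, h2⟩
      exact ⟨⟨Nat.pos_of_dvd_of_pos h3 hn, Nat.le_sqrt.mpr h2⟩, h3⟩
  -- cofactor bijection
  have hbij : ∑ d ∈ n.divisors.filter (fun d => d * d ≤ n), (n / d) =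
      ∑ e ∈ n.divisors.filter (fun e => n ≤ e * e), e := by
    refine Finset.sum_nbij' (fun d => n / d) (fun e => n / e) ?_ ?_ ?_ ?_ ?_
    · rintro d hd
      simp only [Finset.mem_filter, Nat.mem_divisors] at hd ⊢
      obtain ⟨⟨hdvd, _⟩, hle⟩ := hd
      obtain ⟨e, he⟩ := hdvd
      have hd0 : 0 < d := Nat.pos_of_dvd_of_pos ⟨e, he⟩ hn
      have hde : n / d = e := by rw [he, Nat.mul_div_cancel_left _ hd0]
      have hdle : d ≤ e := by
        by_contra h
        push Not at h
        have : d * d > n := by nlinarith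
        omega
      refine ⟨⟨Nat.div_dvd_of_dvd ⟨e, he⟩, hn0⟩, ?_⟩
      rw [hde]
      calc n = d * e := he
        _ ≤ e * e := Nat.mul_le_mul_right _ hdle
    · rintro e he
      simp only [Finset.mem_filter, Nat.mem_divisors] at he ⊢
      obtain ⟨⟨hdvd, _⟩, hle⟩ := he
      obtain ⟨c, hc⟩ := hdvd
      have he0 : 0 < e := Nat.pos_of_dvd_of_pos ⟨c, hc⟩ hn
      have hec : n / e = c := by rw [hc, Nat.mul_div_cancel_left _ he0]
      have hce : c ≤ e := by
        by_contra h
        push Not at h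
        have : n > e * e := by nlinarith
        omega
      refine ⟨⟨Nat.div_dvd_of_dvd ⟨c, hc⟩, hn0⟩, ?_⟩
      rw [hec]
      calc c * c ≤ c * e := Nat.mul_le_mul_left _ hce
        _ = n := by rw [Nat.mul_comm]; exact hc.symm
    · rintro d hd
      simp only [Finset.mem_filter, Nat.mem_divisors] at hd
      exact Nat.div_div_self hd.1.1 hn0
    · rintro e he
      simp only [Finset.mem_filter, Nat.mem_divisors] at he
      exact Nat.div_div_self he.1.1 hn0
    · intro d _; rfl
  -- union and intersection
  have hunion : n.divisors.filter (fun d => d * d ≤ n) ∪ n.divisors.filter (fun e => n ≤ e * e) = n.divisors := by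
    ext d
    simp only [Finset.mem_union, Finset.mem_filter]
    constructor
    · rintro (⟨h, _⟩ | ⟨h, _⟩) <;> exact h
    · intro h
      rcases le_total (d * d) n with h2 | h2
      · exact Or.inl ⟨h, h2⟩
      · exact Or.inr ⟨h, h2⟩
  have hinter : n.divisors.filter (fun d => d * d ≤ n) ∩ n.divisors.filter (fun e => n ≤ e * e) =
      n.divisors.filter (fun d => d * d = n) := by
    ext d
    simp only [Finset.mem_inter, Finset.mem_filter]
    constructor
    · rintro ⟨⟨h, h1⟩, ⟨_, h2⟩⟩; exact ⟨h, by omega⟩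
    · rintro ⟨h, h1⟩; exact ⟨⟨h, by omega⟩, ⟨h, by omega⟩⟩
  have hsq : ∑ d ∈ n.divisors.filter (fun d => d * d = n), d = if r * r = n then r else 0 := by
    by_cases h : r * r = n
    · rw [if_pos h]
      have : n.divisors.filter (fun d => d * d = n) = {r} := by
        ext d
        simp only [Finset.mem_filter, Nat.mem_divisors, Finset.mem_singleton]
        constructor
        · rintro ⟨_, h2⟩
          have hdr : d * d = r * r := by rw [h2, h]
          exact Nat.mul_self_inj.mp hdr
        · rintro rfl
          exact ⟨⟨Dvd.intro r h, hn0⟩, h⟩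
      rw [this, Finset.sum_singleton]
    · rw [if_neg h]
      have : n.divisors.filter (fun d => d * d = n) = ∅ := by
        rw [Finset.filter_eq_empty_iff]
        rintro d _ h2
        apply h
        have hrd : r = d := by rw [hr, ← h2, Nat.sqrt_eq]
        rw [hrd]; exact h2
      rw [this, Finset.sum_empty]
  -- the combined sum over small divisors
  have hsum2 : ∑ d ∈ n.divisors.filter (fun d => d * d ≤ n), (d + n / d) =
      (∑ d ∈ n.divisors, d) + (if r * r = n then r else 0) := by
    have key := Finset.sum_union_inter (s₁ := n.divisors.filter (fun d => d * d ≤ n))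
      (s₂ := n.divisors.filter (fun e => n ≤ e * e)) (f := fun d => d)
    rw [hunion, hinter] at key
    rw [Finset.sum_add_distrib, hbij]
    omega
  -- rewrite the Ico 1 (r+1) sum: bottom element 1 contributes 1 + n
  have hbot : ∑ d ∈ Finset.Ico 1 (r + 1), (if d ∣ n then d + n / d else 0) =
      (1 + n) + ∑ d ∈ Finset.Ico 2 (r + 1), (if d ∣ n then d + n / d else 0) := by
    rw [Finset.sum_eq_sum_Ico_succ_bot (by omega)]
    simp
  have hIco : ∑ d ∈ Finset.Ico 1 (r + 1), (if d ∣ n then d + n / d else 0) =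
      ∑ d ∈ n.divisors.filter (fun d => d * d ≤ n), (d + n / d) := by
    rw [← hF, Finset.sum_filter]
  have hproper : ∑ d ∈ Finset.Ico 1 n, (if d ∣ n then d else 0) = ∑ d ∈ n.properDivisors, d := by
    rw [Nat.properDivisors, Finset.sum_filter]
  have hdiv : ∑ d ∈ n.divisors, d = (∑ d ∈ n.properDivisors, d) + n :=
    Nat.sum_divisors_eq_sum_properDivisors_add_self
  omega

theorem sum_div_eq (l : List Int) : sum_div l = l.sum := by
  unfold sum_div
  rw [PySem.List.foldl_pyRange_zero_pyGetD' l 0 (fun s x => s + x) 0]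
  exact (List.sum_eq_foldl).symm

theorem pv_fold_eq_flatMap (number : Int) (R : Int) :
    (PySem.List.pyRange 2 R 1).foldl
      (fun acc d =>
        if PySem.Int.mod number d == 0 then
          (acc ++ [d]) ++ [PySem.Int.truncdiv number d]
        else acc) [1]
    = [1] ++ (PySem.List.pyRange 2 R 1).flatMap
        (fun d => if PySem.Int.mod number d == 0 then [d, PySem.Int.truncdiv number d] else []) := by
  rw [PySem.List.foldl_congr_mem _ _
    (fun acc d => acc ++ (if PySem.Int.mod number d == 0 then [d, PySem.Int.truncdiv number d] else [])) _
    (by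
      intro acc d _
      by_cases hc : PySem.Int.mod number d == 0
      · simp [hc]
      · simp [hc])]
  exact PySem.List.foldl_append_eq_flatMap _ _ _

theorem pv_flat_sum (n' m : Nat) :
    ((PySem.List.pyRange 2 ((m : Int) + 1) 1).flatMap
      (fun d => if PySem.Int.mod (n' : Int) d == 0 then [d, PySem.Int.truncdiv (n' : Int) d] else [])).sum
    = ((∑ d ∈ Finset.Ico 2 (m + 1), if d ∣ n' then d + n' / d else 0 : Nat) : Int) := by
  rw [List.flatMap_def, List.sum_flatten, List.map_map, PySem.List.pyRange_one]
  have hlen : ((m : Int) + 1 - 2).toNat = m + 1 - 2 := by omega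
  rw [hlen, List.map_map]
  have hterm : ∀ k, ((List.sum ∘ (fun d => if PySem.Int.mod (n' : Int) d == 0
        then [d, PySem.Int.truncdiv (n' : Int) d] else [])) ∘ (fun k : Nat => 2 + (k : Int))) k
      = ((if (2 + k) ∣ n' then (2 + k) + n' / (2 + k) else 0 : Nat) : Int) := by
    intro k
    simp only [Function.comp]
    have hd : (2 + (k : Int)) = ((2 + k : Nat) : Int) := by push_cast; ring
    have htd : PySem.Int.truncdiv (n' : Int) (2 + (k : Int)) = ((n' / (2 + k) : Nat) : Int) := by
      rw [hd]; rfl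
    by_cases hdvd : (2 + k) ∣ n'
    · have hm : PySem.Int.mod (n' : Int) (2 + (k : Int)) = 0 := by
        rw [hd, PySem.Int.mod_eq_zero_iff_dvd]
        exact_mod_cast hdvd
      simp only [hm, beq_self_eq_true, if_true, htd, if_pos hdvd, List.sum_cons, List.sum_nil]
      push_cast
      ring
    · have hm : (PySem.Int.mod (n' : Int) (2 + (k : Int)) == 0) = false := by
        rw [beq_eq_false_iff_ne]
        rw [hd, Ne, PySem.Int.mod_eq_zero_iff_dvd]
        exact_mod_cast hdvd
      simp [hm, hdvd]
  have hmap : ((List.range (m + 1 - 2)).map ((List.sum ∘ (fun d => if PySem.Int.mod (n' : Int) d == 0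
        then [d, PySem.Int.truncdiv (n' : Int) d] else [])) ∘ (fun k : Nat => 2 + (k : Int)))).sum
      = ∑ k ∈ Finset.range (m + 1 - 2), ((if (2 + k) ∣ n' then (2 + k) + n' / (2 + k) else 0 : Nat) : Int) := by
    have : ((List.range (m + 1 - 2)).map (fun k => ((if (2 + k) ∣ n' then (2 + k) + n' / (2 + k) else 0 : Nat) : Int))).sum
        = ∑ k ∈ Finset.range (m + 1 - 2), ((if (2 + k) ∣ n' then (2 + k) + n' / (2 + k) else 0 : Nat) : Int) := rfl
    rw [← this]
    congr 1
    exact List.map_congr_left (fun k _ => hterm k)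
  rw [hmap, ← Nat.cast_sum, Finset.sum_Ico_eq_sum_range]

theorem pv_sums_eq (n' : Nat) (h1 : 1 ≤ n') :
    (find_div (n' : Int)).sum =
      ((∑ d ∈ Finset.Ico 1 n', if d ∣ n' then d else 0 : Nat) : Int) := by
  by_cases hn1 : n' = 1
  · subst hn1; decide
  have hroot : ((n' : Int).toNat.sqrt : Int) = (n'.sqrt : Int) := by simp
  set r := n'.sqrt with hr
  have hr1 : 1 ≤ r := Nat.le_sqrt.mpr (by omega)
  unfold find_div perfect_square
  simp only [hroot, pv_fold_eq_flatMap]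
  by_cases hsq : r * r = n'
  · -- perfect square, n' ≠ 1 hence r ≥ 2
    have hr2 : 2 ≤ r := by
      by_contra hc
      have : r = 1 := by omega
      rw [this] at hsq
      omega
    have hb : ((r : Int) * (r : Int) == (n' : Int)) = true := by
      rw [beq_iff_eq]; exact_mod_cast hsq
    rw [hb]
    simp only [if_true]
    -- split the range at r
    rw [PySem.List.pyRange_one_append 2 (r : Int) ((r : Int) + 1)
      (by exact_mod_cast hr2) (by omega),
      PySem.List.pyRange_one_singleton, List.flatMap_append]
    have hrdvd : r ∣ n' := ⟨r, hsq.symm⟩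
    have hmr : PySem.Int.mod (n' : Int) (r : Int) = 0 := by
      rw [PySem.Int.mod_eq_zero_iff_dvd]; exact_mod_cast hrdvd
    have hgr : (fun d => if PySem.Int.mod (n' : Int) d == 0
        then [d, PySem.Int.truncdiv (n' : Int) d] else []) =
        (fun d : Int => if PySem.Int.mod (n' : Int) d == 0
        then [d, PySem.Int.truncdiv (n' : Int) d] else []) := rfl
    have hflatr : ([(r : Int)].flatMap (fun d => if PySem.Int.mod (n' : Int) d == 0
        then [d, PySem.Int.truncdiv (n' : Int) d] else []))
        = [(r : Int), PySem.Int.truncdiv (n' : Int) (r : Int)] := by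
      simp [hmr]
    rw [hflatr]
    set flat := (PySem.List.pyRange 2 (r : Int) 1).flatMap
      (fun d => if PySem.Int.mod (n' : Int) d == 0
        then [d, PySem.Int.truncdiv (n' : Int) d] else []) with hflat
    have hassoc : ([(1 : Int)] ++ (flat ++ [(r : Int), PySem.Int.truncdiv (n' : Int) (r : Int)]))
        = (([(1 : Int)] ++ flat ++ [(r : Int)]) ++ [PySem.Int.truncdiv (n' : Int) (r : Int)]) := by
      simp
    rw [hassoc, List.dropLast_concat]
    rw [List.sum_append, List.sum_append]
    have hflatsum : flat.sum = ((∑ d ∈ Finset.Ico 2 r, if d ∣ n' then d + n' / d else 0 : Nat) : Int) := by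
      have hcast : (r : Int) = (((r - 1 : Nat) : Int) + 1) := by omega
      rw [hflat, hcast, pv_flat_sum n' (r - 1)]
      have : r - 1 + 1 = r := by omega
      rw [this]
    rw [hflatsum]
    -- master identity, square case
    have hmaster := pv_master n' h1
    rw [← hr, if_pos hsq] at hmaster
    have hdivr : n' / r = r := by
      rw [← hsq, Nat.mul_div_cancel _ (by omega)]
    have hsplit : ∑ d ∈ Finset.Ico 2 (r + 1), (if d ∣ n' then d + n' / d else 0)
        = (∑ d ∈ Finset.Ico 2 r, if d ∣ n' then d + n' / d else 0) + (r + r) := by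
      rw [Finset.sum_Ico_succ_top hr2, if_pos hrdvd, hdivr]
    rw [hsplit] at hmaster
    simp only [List.sum_cons, List.sum_nil]
    have hm2 := congrArg (fun t : Nat => (t : Int)) hmaster
    push_cast at hm2 ⊢
    omega
  · have hb : ((r : Int) * (r : Int) == (n' : Int)) = false := by
      rw [beq_eq_false_iff_ne]
      intro hc
      exact hsq (by exact_mod_cast hc)
    rw [hb]
    simp only [Bool.false_eq_true, if_false]
    rw [List.sum_append]
    have hcast : ((r : Int) + 1) = (((r : Nat) : Int) + 1) := rfl
    rw [pv_flat_sum n' r]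
    have hmaster := pv_master n' h1
    rw [← hr, if_neg hsq] at hmaster
    simp only [List.sum_cons, List.sum_nil]
    have hm2 := congrArg (fun t : Nat => (t : Int)) hmaster
    push_cast at hm2 ⊢
    omega


def sigma_innerN (fuel : Nat) (d m term : Nat) : Nat × Nat :=
  match fuel with
  | 0 => (m, term)
  | f + 1 =>
    if m % d == 0 then sigma_innerN f d (m / d) (term * d + 1) else (m, term)

def sigma_outerN (fuel : Nat) (d m total : Nat) : Nat × Nat :=
  match fuel with
  | 0 => (m, total)
  | f + 1 =>
    if d * d ≤ m then
      if m % d == 0 then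
        let p := sigma_innerN m d m 1
        sigma_outerN f (d + 1) p.1 (total * p.2)
      else sigma_outerN f (d + 1) m total
    else (m, total)

def pvS (n : Nat) : Nat := ∑ d ∈ n.divisors, d

theorem pv_modb (d m : Nat) : (m % d == 0) = decide (d ∣ m) := by
  by_cases h : d ∣ m
  · simp [h, Nat.dvd_iff_mod_eq_zero.mp h]
  · have hm : ¬ m % d = 0 := fun hc => h (Nat.dvd_of_mod_eq_zero hc)
    simp [h, hm]

theorem pv_inner_spec (d : Nat) (hd : 2 ≤ d) :
    ∀ (fuel m term : Nat), 0 < m → m ≤ fuel →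
    ∃ k m', sigma_innerN fuel d m term = (m', term * d ^ k + ∑ i ∈ Finset.range k, d ^ i)
      ∧ m = d ^ k * m' ∧ ¬ d ∣ m' := by
  intro fuel
  induction fuel with
  | zero => intro m term h0 hle; omega
  | succ f ih =>
    intro m term h0 hle
    by_cases hdvd : d ∣ m
    · have hmod : (m % d == 0) = true := by
        rw [pv_modb]; simp [hdvd]
      have hmd : 0 < m / d := Nat.div_pos (Nat.le_of_dvd h0 hdvd) (by omega)
      have hlt : m / d < m := Nat.div_lt_self h0 (by omega)
      obtain ⟨k, m', heq, hfac, hnd⟩ := ih (m / d) (term * d + 1) hmd (by omega)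
      refine ⟨k + 1, m', ?_, ?_, hnd⟩
      · show sigma_innerN (f + 1) d m term = _
        rw [sigma_innerN, if_pos hmod, heq]
        congr 1
        rw [Finset.sum_range_succ]
        ring
      · have hm : m = d * (m / d) := (Nat.mul_div_cancel' hdvd).symm
        rw [hm, hfac]
        ring
    · refine ⟨0, m, ?_, by simp, hdvd⟩
      have hmod : (m % d == 0) = false := by
        rw [pv_modb]; simp [hdvd]
      rw [sigma_innerN, if_neg (by simp [hmod])]
      simp

theorem pv_prime_of_min_fac (d m : Nat) (hd : 2 ≤ d) (hdvd : d ∣ m)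
    (hmin : ∀ p, p.Prime → p ∣ m → d ≤ p) : d.Prime := by
  obtain ⟨p, hp, hpd⟩ := Nat.exists_prime_and_dvd (by omega : d ≠ 1)
  have h1 : d ≤ p := hmin p hp (hpd.trans hdvd)
  have h2 : p = d := le_antisymm (Nat.le_of_dvd (by omega) hpd) h1
  rwa [← h2]

theorem pv_small_no_factor (d m : Nat) (hd : 2 ≤ d) (h0 : 0 < m)
    (hmin : ∀ p, p.Prime → p ∣ m → d ≤ p) (hsm : m < d * d) : m = 1 ∨ m.Prime := by
  by_cases h1 : m = 1
  · exact Or.inl h1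
  obtain ⟨p, hp, hpd⟩ := Nat.exists_prime_and_dvd h1
  have hdp : d ≤ p := hmin p hp hpd
  obtain ⟨q, hq⟩ := hpd
  have hq0 : 0 < q := by
    rcases Nat.eq_zero_or_pos q with h | h
    · rw [h, Nat.mul_zero] at hq; omega
    · exact h
  by_cases hq1 : q = 1
  · right; rw [hq, hq1, Nat.mul_one]; exact hp
  · exfalso
    obtain ⟨r, hr, hrq⟩ := Nat.exists_prime_and_dvd hq1
    have hdr : d ≤ r := hmin r hr (hrq.trans ⟨p, by rw [hq]; ring⟩)
    have hrle : r ≤ q := Nat.le_of_dvd hq0 hrq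
    have : d * d ≤ p * q := Nat.mul_le_mul hdp (by omega)
    omega

theorem pv_sigma_prime_pow (p k : Nat) (hp : p.Prime) :
    pvS (p ^ k) = ∑ i ∈ Finset.range (k + 1), p ^ i := by
  unfold pvS
  rw [Nat.sum_divisors_prime_pow hp]

theorem pv_S_mul (a b : Nat) (h : Nat.Coprime a b) : pvS (a * b) = pvS a * pvS b := by
  unfold pvS
  rw [← ArithmeticFunction.sigma_one_apply, ← ArithmeticFunction.sigma_one_apply,
    ← ArithmeticFunction.sigma_one_apply]
  exact ArithmeticFunction.isMultiplicative_sigma.map_mul_of_coprime h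

theorem pv_outer_spec :
    ∀ (fuel d m total : Nat), 2 ≤ d → 0 < m →
    (∀ p, p.Prime → p ∣ m → d ≤ p) → m < (d + fuel) * (d + fuel) →
    ((sigma_outerN fuel d m total).1 = 1 ∨ ((sigma_outerN fuel d m total).1).Prime)
    ∧ (sigma_outerN fuel d m total).2 * pvS (sigma_outerN fuel d m total).1 = total * pvS m := by
  intro fuel
  induction fuel with
  | zero =>
    intro d m total hd h0 hmin hfm
    rw [Nat.add_zero] at hfm
    constructor
    · exact pv_small_no_factor d m hd h0 hmin hfm
    · rfl
  | succ f ih =>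
    intro d m total hd h0 hmin hfm
    by_cases hcond : d * d ≤ m
    · by_cases hdvd : d ∣ m
      · have hmod : (m % d == 0) = true := by
          rw [pv_modb]; simp [hdvd]
        obtain ⟨k, m', heq, hfac, hnd⟩ := pv_inner_spec d hd m m 1 h0 (le_refl m)
        have hdp : d.Prime := pv_prime_of_min_fac d m hd hdvd hmin
        have hk : 1 ≤ k := by
          by_contra hk0
          have : k = 0 := by omega
          rw [this, pow_zero, one_mul] at hfac
          rw [← hfac] at hnd
          exact hnd hdvd
        have hm'0 : 0 < m' := by
          rcases Nat.eq_zero_or_pos m' with h | h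
          · rw [h, Nat.mul_zero] at hfac; omega
          · exact h
        have hm'le : m' ≤ m := by
          calc m' ≤ d ^ k * m' := Nat.le_mul_of_pos_left _ (by positivity)
            _ = m := hfac.symm
        have hmin' : ∀ p, p.Prime → p ∣ m' → d + 1 ≤ p := by
          intro p hp hpm'
          have hpm : p ∣ m := hpm'.trans ⟨d ^ k, by rw [hfac]; ring⟩
          have h1 := hmin p hp hpm
          rcases Nat.lt_or_ge d p with h | h
          · omega
          · exfalso
            have : p = d := by omega
            rw [this] at hpm'
            exact hnd hpm'
        have hterm : 1 * d ^ k + ∑ i ∈ Finset.range k, d ^ i = pvS (d ^ k) := by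
          rw [pv_sigma_prime_pow d k hdp, Finset.sum_range_succ, one_mul, Nat.add_comm]
        have hcop : Nat.Coprime (d ^ k) m' :=
          Nat.Coprime.pow_left _ ((Nat.Prime.coprime_iff_not_dvd hdp).mpr hnd)
        have hSm : pvS m = pvS (d ^ k) * pvS m' := by
          rw [hfac, pv_S_mul _ _ hcop]
        rw [show d + (f + 1) = d + 1 + f by omega] at hfm
        have hrec := ih (d + 1) m' (total * (1 * d ^ k + ∑ i ∈ Finset.range k, d ^ i))
          (by omega) hm'0 hmin' (by omega)
        have hstep : sigma_outerN (f + 1) d m total =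
            sigma_outerN f (d + 1) m' (total * (1 * d ^ k + ∑ i ∈ Finset.range k, d ^ i)) := by
          rw [sigma_outerN, if_pos hcond, if_pos hmod, heq]
        rw [hstep]
        refine ⟨hrec.1, ?_⟩
        rw [hrec.2, hterm, hSm]
        ring
      · have hmod : (m % d == 0) = false := by
          rw [pv_modb]; simp [hdvd]
        have hmin' : ∀ p, p.Prime → p ∣ m → d + 1 ≤ p := by
          intro p hp hpm
          have h1 := hmin p hp hpm
          rcases Nat.lt_or_ge d p with h | h
          · omega
          · exfalso
            have : p = d := by omega
            rw [this] at hpm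
            exact hdvd hpm
        have hstep : sigma_outerN (f + 1) d m total = sigma_outerN f (d + 1) m total := by
          rw [sigma_outerN, if_pos hcond, if_neg (by simp [hmod])]
        rw [show d + (f + 1) = d + 1 + f by omega] at hfm
        rw [hstep]
        exact ih (d + 1) m total (by omega) h0 hmin' (by omega)
    · have hstep : sigma_outerN (f + 1) d m total = (m, total) := by
        rw [sigma_outerN, if_neg hcond]
      rw [hstep]
      exact ⟨pv_small_no_factor d m hd h0 hmin (by omega), rfl⟩

theorem pv_sigmaN (n : Nat) (h1 : 1 ≤ n) :
    (if 1 < (sigma_outerN n 2 n 1).1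
      then (sigma_outerN n 2 n 1).2 * ((sigma_outerN n 2 n 1).1 + 1)
      else (sigma_outerN n 2 n 1).2) = pvS n := by
  have hmin : ∀ p, p.Prime → p ∣ n → 2 ≤ p := fun p hp _ => hp.two_le
  have hfm : n < (2 + n) * (2 + n) := by nlinarith
  obtain ⟨hcase, heq⟩ := pv_outer_spec n 2 n 1 (le_refl 2) (by omega) hmin hfm
  rcases hcase with h | h
  · rw [h] at heq ⊢
    rw [if_neg (by omega)]
    have hS1 : pvS 1 = 1 := by simp [pvS]
    rw [hS1, Nat.mul_one] at heq
    omega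
  · have h2 := h.two_le
    rw [if_pos (by omega : 1 < (sigma_outerN n 2 n 1).1)]
    have hSp : pvS (sigma_outerN n 2 n 1).1 = 1 + (sigma_outerN n 2 n 1).1 := by
      unfold pvS
      rw [Nat.Prime.divisors h, Finset.sum_pair (by omega)]
    rw [hSp, Nat.one_mul] at heq
    rw [← heq]
    ring

theorem pv_inner_cast (d : Nat) : ∀ (fuel : Nat) (m term : Nat),
    sigma_inner fuel (d : Int) (m : Int) (term : Int) =
      (((sigma_innerN fuel d m term).1 : Int), ((sigma_innerN fuel d m term).2 : Int)) := by
  intro fuel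
  induction fuel with
  | zero => intro m term; rfl
  | succ f ih =>
    intro m term
    rw [sigma_inner, sigma_innerN]
    by_cases hdvd : d ∣ m
    · have h1 : (PySem.Int.mod (m : Int) (d : Int) == 0) = true := by
        simp [PySem.Int.mod_natCast, Nat.dvd_iff_mod_eq_zero.mp hdvd]
      have h2 : (m % d == 0) = true := by
        simp [Nat.dvd_iff_mod_eq_zero.mp hdvd]
      rw [h1, h2, if_pos rfl, if_pos rfl]
      have hfd : PySem.Int.floordiv (m : Int) (d : Int) = ((m / d : Nat) : Int) :=
        PySem.Int.floordiv_natCast m d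
      rw [hfd, show ((term : Int) * (d : Int) + 1) = ((term * d + 1 : Nat) : Int) by push_cast; ring]
      exact ih (m / d) (term * d + 1)
    · have h1 : (PySem.Int.mod (m : Int) (d : Int) == 0) = false := by
        rw [PySem.Int.mod_natCast]
        simp
        intro hc
        exact hdvd (by exact_mod_cast hc)
      have h2 : (m % d == 0) = false := by
        simp
        intro hc
        exact hdvd (Nat.dvd_of_mod_eq_zero hc)
      rw [h1, h2]
      simp

theorem pv_outer_cast : ∀ (fuel : Nat) (d m total : Nat),
    sigma_outer fuel (d : Int) (m : Int) (total : Int) =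
      (((sigma_outerN fuel d m total).1 : Int), ((sigma_outerN fuel d m total).2 : Int)) := by
  intro fuel
  induction fuel with
  | zero => intro d m total; rfl
  | succ f ih =>
    intro d m total
    rw [sigma_outer, sigma_outerN]
    by_cases hcond : d * d ≤ m
    · rw [if_pos (by exact_mod_cast hcond : (d : Int) * (d : Int) ≤ (m : Int)), if_pos hcond]
      by_cases hdvd : d ∣ m
      · have h1 : (PySem.Int.mod (m : Int) (d : Int) == 0) = true := by
          simp [PySem.Int.mod_natCast, Nat.dvd_iff_mod_eq_zero.mp hdvd]
        have h2 : (m % d == 0) = true := by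
          simp [Nat.dvd_iff_mod_eq_zero.mp hdvd]
        rw [h1, h2, if_pos rfl, if_pos rfl, Int.toNat_natCast]
        have hic : sigma_inner m (d : Int) (m : Int) 1 =
            (((sigma_innerN m d m 1).1 : Int), ((sigma_innerN m d m 1).2 : Int)) := by
          exact_mod_cast pv_inner_cast d m m 1
        rw [hic]
        exact_mod_cast ih (d + 1) (sigma_innerN m d m 1).1 (total * (sigma_innerN m d m 1).2)
      · have h1 : (PySem.Int.mod (m : Int) (d : Int) == 0) = false := by
          rw [PySem.Int.mod_natCast]
          simp
          intro hc
          exact hdvd (by exact_mod_cast hc)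
        have h2 : (m % d == 0) = false := by
          simp
          intro hc
          exact hdvd (Nat.dvd_of_mod_eq_zero hc)
        rw [h1, h2]
        simp only [Bool.false_eq_true, if_false]
        exact_mod_cast ih (d + 1) m total
    · rw [if_neg (by exact_mod_cast hcond), if_neg hcond]

theorem pv_sigma_fn_eq (n' : Nat) (h1 : 1 ≤ n') : sigma_fn (n' : Int) = ((pvS n' : Nat) : Int) := by
  unfold sigma_fn
  show (let p := sigma_outer ((n' : Int)).toNat 2 (n' : Int) 1;
    if p.1 > 1 then p.2 * (p.1 + 1) else p.2) = _
  rw [Int.toNat_natCast]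
  have hoc : sigma_outer n' 2 (n' : Int) 1 =
      (((sigma_outerN n' 2 n' 1).1 : Int), ((sigma_outerN n' 2 n' 1).2 : Int)) := by
    exact_mod_cast pv_outer_cast n' 2 n' 1
  rw [hoc]
  rw [← pv_sigmaN n' h1]
  simp only [gt_iff_lt]
  by_cases hgt : 1 < (sigma_outerN n' 2 n' 1).1
  · rw [if_pos (show (1 : Int) < ((sigma_outerN n' 2 n' 1).1 : Int) by exact_mod_cast hgt),
      if_pos hgt]
    push_cast
    ring
  · rw [if_neg (show ¬ (1 : Int) < ((sigma_outerN n' 2 n' 1).1 : Int) by exact_mod_cast hgt),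
      if_neg hgt]

theorem pv_is_perfect_eq (n : Int) (h : 1 ≤ n) : is_perfect n = (sigma_fn n == 2 * n) := by
  have hn' : n = ((n.toNat : Nat) : Int) := (Int.toNat_of_nonneg (by omega)).symm
  have h1' : 1 ≤ n.toNat := by omega
  unfold is_perfect
  simp only [sum_div_eq]
  rw [hn', pv_sums_eq n.toNat h1', pv_sigma_fn_eq n.toNat h1']
  have hPS : pvS n.toNat = (∑ d ∈ Finset.Ico 1 n.toNat, if d ∣ n.toNat then d else 0) + n.toNat := by
    unfold pvS
    rw [Nat.sum_divisors_eq_sum_properDivisors_add_self]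
    congr 1
    rw [Nat.properDivisors, Finset.sum_filter]
  have hA : (((∑ d ∈ Finset.Ico 1 n.toNat, if d ∣ n.toNat then d else 0 : Nat) : Int)
      == ((n.toNat : Nat) : Int)) =
      decide ((∑ d ∈ Finset.Ico 1 n.toNat, if d ∣ n.toNat then d else 0) = n.toNat) := by
    rw [Bool.beq_eq_decide_eq]
    exact decide_eq_decide.mpr (by constructor <;> intro hc <;> exact_mod_cast hc)
  have hB : (((pvS n.toNat : Nat) : Int) == 2 * ((n.toNat : Nat) : Int)) =
      decide (pvS n.toNat = 2 * n.toNat) := by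
    rw [Bool.beq_eq_decide_eq]
    exact decide_eq_decide.mpr (by constructor <;> intro hc <;> exact_mod_cast hc)
  rw [hA, hB]
  have : ((∑ d ∈ Finset.Ico 1 n.toNat, if d ∣ n.toNat then d else 0) = n.toNat)
      ↔ (pvS n.toNat = 2 * n.toNat) := by omega
  rw [decide_eq_decide.mpr this]
  cases h : decide (pvS n.toNat = 2 * n.toNat) <;> simp

theorem pv_loop_eq : ∀ (fuel : Nat) (n : Int), 6 + (fuel : Int) ≤ n →
    find_perf_loop fuel n = find_perf_alt_loop fuel n := by
  intro fuel
  induction fuel with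
  | zero => intro n _; rfl
  | succ f ih =>
    intro n hb
    have hb' : (6 : Int) + ((f : Nat) : Int) + 1 ≤ n := by push_cast at hb ⊢; omega
    have hperf := pv_is_perfect_eq (n - 1) (by omega)
    simp only [find_perf_loop, find_perf_alt_loop, hperf]
    cases hc : (sigma_fn (n - 1) == 2 * (n - 1)) with
    | true => rfl
    | false => exact ih (n - 1) (by omega)

-- ===== VERDICT (by name: the statement is the Claim_ definition above) =====
theorem find_perf_spec : Claim_equal_find_perf := by
  intro number _ hpre
  unfold Pre_find_perf at hpre
  unfold Spec_find_perf find_perf find_perf_alt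
  rw [if_neg (by omega), if_neg (by omega)]
  exact pv_loop_eq _ _ (by rw [Int.toNat_of_nonneg (by omega)]; omega)
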